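-- pv_equiv track=rewrite | github.com/samwedge/advent-of-code-2023 | aoc/day1_pt2.py | find_calibration_number_for_line
-- ===== SOURCE A (Python) =====
-- MAPPING = {
--     "one": "1",
--     "two": "2",
--     "three": "3",
--     "four": "4",
--     "five": "5",
--     "six": "6",
--     "seven": "7",
--     "eight": "8",
--     "nine": "9",
-- }
--
-- def find_calibration_number_for_line(line: str) -> int:
--     indexes = {
--         **{
--             index: number_value
--             for number_string, number_value in MAPPING.items()
--             if (index := line.find(number_string)) != -1
--         },
--         **{
--             index: number_value
--             for number_string, number_value in MAPPING.items()
--             if (index := line.rfind(number_string)) != -1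
--         },
--         **{
--             index: number_value
--             for _, number_value in MAPPING.items()
--             if (index := line.find(number_value)) != -1
--         },
--         **{
--             index: number_value
--             for _, number_value in MAPPING.items()
--             if (index := line.rfind(number_value)) != -1
--         },
--     }
--
--     leftmost = indexes[min(indexes)]
--     rightmost = indexes[max(indexes)]
--
--     return int(leftmost + rightmost)
-- ===== SOURCE B (Python) =====
-- DIGITS = "123456789"
--
-- WORDS = {
--     "one": 1,
--     "two": 2,
--     "three": 3,
--     "four": 4,
--     "five": 5,
--     "six": 6,
--     "seven": 7,
--     "eight": 8,
--     "nine": 9,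
-- }
--
--
-- def find_calibration_number_for_line(line: str) -> int:
--     found = []
--     for i in range(len(line)):
--         c = line[i]
--         if c in DIGITS:
--             found.append(ord(c) - 48)
--         else:
--             for word, value in WORDS.items():
--                 if line.startswith(word, i):
--                     found.append(value)
--                     break
--     if not found:
--         raise ValueError("no digit or number word in line")
--     return 10 * found[0] + found[-1]
-- ===== Notes on version B (the rewrite author's own statement) =====
-- stated objective: simpler
-- what changed: Replaces the four find/rfind dict comprehensions merged into an index-keyed dict with a single left-to-right scan that appends the digit value at every position where a digit char or spelled word starts, returning 10*first+last.
import Mathlib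
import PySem

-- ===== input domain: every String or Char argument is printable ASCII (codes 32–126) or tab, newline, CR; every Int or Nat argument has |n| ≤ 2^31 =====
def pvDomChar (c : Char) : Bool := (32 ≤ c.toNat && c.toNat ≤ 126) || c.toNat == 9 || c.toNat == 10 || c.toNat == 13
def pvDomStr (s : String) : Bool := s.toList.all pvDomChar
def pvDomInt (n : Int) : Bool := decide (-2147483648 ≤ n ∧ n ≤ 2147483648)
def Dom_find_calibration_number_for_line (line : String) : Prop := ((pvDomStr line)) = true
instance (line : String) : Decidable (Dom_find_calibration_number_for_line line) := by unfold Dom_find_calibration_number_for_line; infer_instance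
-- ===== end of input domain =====

-- B replaces A's four find/rfind dict comprehensions (merged into an index-keyed dict, then
-- min/max over its keys) by one left-to-right scan collecting the digit value at every position
-- where a digit char or a spelled number word starts (objective: simpler).

-- ===== PORT A =====
-- MAPPING, a dict with distinct literal string keys, as an association list of char lists
def MAPPING_A : List (List Char × List Char) :=
  [(['o','n','e'], ['1']), (['t','w','o'], ['2']), (['t','h','r','e','e'], ['3']),
   (['f','o','u','r'], ['4']), (['f','i','v','e'], ['5']), (['s','i','x'], ['6']),
   (['s','e','v','e','n'], ['7']), (['e','i','g','h','t'], ['8']), (['n','i','n','e'], ['9'])]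

-- one dict comprehension {index: number_value for … if (index := key(item)) != -1}
def compA (key : (List Char × List Char) → Int) : PySem.Dict Int (List Char) :=
  MAPPING_A.foldl (fun d p => if key p ≠ -1 then d.insert (key p) p.2 else d) PySem.Dict.empty

-- the merged dict {**c1, **c2, **c3, **c4}: items inserted in order into a fresh dict
def indexesA (l : List Char) : PySem.Dict Int (List Char) :=
  ((((PySem.Dict.empty.update (compA (fun p => PySem.Chars.find l p.1)).items).update
      (compA (fun p => PySem.Chars.rfind l p.1)).items).update
      (compA (fun p => PySem.Chars.find l p.2)).items).update
      (compA (fun p => PySem.Chars.rfind l p.2)).items)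

def find_calibration_number_for_line (line : String) : Int :=
  let indexes := indexesA line.toList
  -- min(indexes) / max(indexes) iterate the dict's keys; on an empty dict Python raises
  -- ValueError (excluded by Pre_); int(leftmost + rightmost) never raises when reached
  match PySem.List.min? indexes.keys (fun k => k), PySem.List.max? indexes.keys (fun k => k) with
  | some mn, some mx =>
      match indexes.get? mn, indexes.get? mx with
      | some leftmost, some rightmost => (PySem.Int.ofChars? (leftmost ++ rightmost)).getD 0
      | _, _ => 0      -- unreachable: mn and mx are keys of the dict
  | _, _ => 0          -- Python raises ValueError here (min of an empty dict); outside Pre_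

-- ===== PORT B =====
def DIGITS_B : List Char := ['1','2','3','4','5','6','7','8','9']

def WORDS_B : List (List Char × Int) :=
  [(['o','n','e'], 1), (['t','w','o'], 2), (['t','h','r','e','e'], 3),
   (['f','o','u','r'], 4), (['f','i','v','e'], 5), (['s','i','x'], 6),
   (['s','e','v','e','n'], 7), (['e','i','g','h','t'], 8), (['n','i','n','e'], 9)]

-- the body of the for-loop: acc is `found` so far, i the current index
def stepB (l : List Char) (acc : List Int) (i : Nat) : List Int :=
  match l[i]? with
  | none => acc                              -- unreachable: i < len(line)
  | some c =>
    if PySem.Chars.isIn [c] DIGITS_B then acc ++ [(c.toNat : Int) - 48]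
    else
      match WORDS_B.find? (fun p => PySem.Chars.startswith (l.drop i) p.1) with
      | some p => acc ++ [p.2]               -- first matching word, then break
      | none => acc

def find_calibration_number_for_line_alt (line : String) : Int :=
  let l := line.toList
  -- for i in range(len(line)): i is a nonnegative in-range index, so l[i]? is exact for line[i];
  -- line.startswith(word, i) is exactly: word is a prefix of l.drop i (0 ≤ i ≤ len)
  let found := (List.range l.length).foldl (stepB l) []
  match found with
  | [] => 0                                      -- Python raises ValueError here; outside Pre_
  | f :: rest => 10 * f + (f :: rest).getLast (List.cons_ne_nil f rest)

-- ===== PRECONDITION & SPEC =====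
-- Pre_ excludes exactly the lines containing no digit 1-9 and no spelled number word:
-- there A raises ValueError (min of an empty dict), and B raises ValueError as well.
def Pre_find_calibration_number_for_line (line : String) : Prop :=
  (MAPPING_A.any (fun p =>
     PySem.Chars.isIn p.1 line.toList || PySem.Chars.isIn p.2 line.toList)) = true
instance (line : String) : Decidable (Pre_find_calibration_number_for_line line) := by
  unfold Pre_find_calibration_number_for_line; infer_instance

def pvWitness_find_calibration_number_for_line : String := "one"

def Spec_find_calibration_number_for_line (line : String) (out : Int) : Prop := out = find_calibration_number_for_line_alt line
instance (line : String) (out : Int) : Decidable (Spec_find_calibration_number_for_line line out) := by unfold Spec_find_calibration_number_for_line; infer_instance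

-- ===== CLAIM (what is proved, stated in full; the proofs are below) =====
def Claim_equal_find_calibration_number_for_line : Prop := ∀ (line : String), Dom_find_calibration_number_for_line line → Pre_find_calibration_number_for_line line → Spec_find_calibration_number_for_line line (find_calibration_number_for_line line)

-- ===== LEMMAS AND PROOFS =====

-- ---- the master token table: every searched token with its digit char ----
def ATOK : List (List Char × Char) :=
  [(['o','n','e'], '1'), (['t','w','o'], '2'), (['t','h','r','e','e'], '3'),
   (['f','o','u','r'], '4'), (['f','i','v','e'], '5'), (['s','i','x'], '6'),
   (['s','e','v','e','n'], '7'), (['e','i','g','h','t'], '8'), (['n','i','n','e'], '9'),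
   (['1'], '1'), (['2'], '2'), (['3'], '3'), (['4'], '4'), (['5'], '5'),
   (['6'], '6'), (['7'], '7'), (['8'], '8'), (['9'], '9')]

-- the token (if any) matching at position i, with its digit char
def M (l : List Char) (i : Nat) : Option Char :=
  (ATOK.find? (fun q => q.1.isPrefixOf (l.drop i))).map (·.2)

-- positions where some token matches, in increasing order
def posL (l : List Char) : List Nat :=
  (List.range l.length).filter (fun i => (M l i).isSome)

def vAt (l : List Char) (i : Nat) : Int :=
  match M l i with
  | some c => (c.toNat : Int) - 48
  | none => 0

-- A-side candidate description
def isCand (l : List Char) (k : Int) (v : List Char) : Prop :=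
  ∃ p ∈ MAPPING_A, v = p.2 ∧ k ≠ -1 ∧
    (k = PySem.Chars.find l p.1 ∨ k = PySem.Chars.rfind l p.1 ∨
     k = PySem.Chars.find l p.2 ∨ k = PySem.Chars.rfind l p.2)

-- ---- decidable table facts ----
lemma atok_no_prefix : ∀ q ∈ ATOK, ∀ q' ∈ ATOK, q.1 <+: q'.1 → q = q' := by
  set_option maxRecDepth 4000 in decide
lemma atok_ne_nil : ∀ q ∈ ATOK, q.1 ≠ [] := by decide
lemma atok_digit : ∀ q ∈ ATOK, q.2 ∈ DIGITS_B := by decide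
lemma mapping_atok : ∀ p ∈ MAPPING_A,
    p.2 = [p.2.headI] ∧ (p.1, p.2.headI) ∈ ATOK ∧ ([p.2.headI], p.2.headI) ∈ ATOK := by
  set_option maxRecDepth 4000 in decide
lemma atok_mapping : ∀ q ∈ ATOK,
    ∃ p, p ∈ MAPPING_A ∧ p.2 = [q.2] ∧ (p.1 = q.1 ∨ p.2 = q.1) := by
  set_option maxRecDepth 4000 in decide
lemma digit_atok : ∀ c ∈ DIGITS_B, ([c], c) ∈ ATOK := by
  intro c hc; fin_cases hc <;> decide
lemma words_atok : WORDS_B = (ATOK.take 9).map (fun q => (q.1, (q.2.toNat : Int) - 48)) := by decide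
lemma atok_split : ATOK = ATOK.take 9 ++ DIGITS_B.map (fun c => ([c], c)) := by decide
lemma ofChars_two_digits : ∀ c1 ∈ DIGITS_B, ∀ c2 ∈ DIGITS_B,
    PySem.Int.ofChars? [c1, c2] = some (10 * ((c1.toNat : Int) - 48) + ((c2.toNat : Int) - 48)) := by
  intro c1 h1 c2 h2; fin_cases h1 <;> fin_cases h2 <;> decide

-- ---- uniqueness of the match ----
lemma atok_uniq {x : List Char} {q q' : List Char × Char} (hq : q ∈ ATOK) (hq' : q' ∈ ATOK)
    (h1 : q.1 <+: x) (h2 : q'.1 <+: x) : q = q' := by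
  rcases List.prefix_or_prefix_of_prefix h1 h2 with h | h
  · exact atok_no_prefix q hq q' hq' h
  · exact (atok_no_prefix q' hq' q hq h).symm

lemma M_eq_of_prefix {l : List Char} {i : Nat} {q : List Char × Char}
    (hq : q ∈ ATOK) (h : q.1 <+: l.drop i) : M l i = some q.2 := by
  have hs : (ATOK.find? (fun q => q.1.isPrefixOf (l.drop i))).isSome := by
    rw [List.find?_isSome]
    exact ⟨q, hq, List.isPrefixOf_iff_prefix.mpr h⟩
  obtain ⟨q', hm⟩ := Option.isSome_iff_exists.mp hs
  have hmem := List.mem_of_find?_eq_some hm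
  have hp := List.isPrefixOf_iff_prefix.mp (List.find?_some (p := fun (q : List Char × Char) => q.1.isPrefixOf (l.drop i)) hm)
  have hqq : q' = q := atok_uniq hmem hq hp h
  simp [M, hm, hqq]

lemma M_some_spec {l : List Char} {i : Nat} {c : Char} (h : M l i = some c) :
    ∃ q ∈ ATOK, q.2 = c ∧ q.1 <+: l.drop i := by
  unfold M at h
  obtain ⟨q, hf, hc⟩ := Option.map_eq_some_iff.mp h
  exact ⟨q, List.mem_of_find?_eq_some hf, hc, List.isPrefixOf_iff_prefix.mp (List.find?_some (p := fun (q : List Char × Char) => q.1.isPrefixOf (l.drop i)) hf)⟩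

lemma M_lt_length {l : List Char} {i : Nat} {c : Char} (h : M l i = some c) : i < l.length := by
  obtain ⟨q, hq, -, hp⟩ := M_some_spec h
  by_contra hge
  rw [List.drop_eq_nil_of_le (Nat.le_of_not_lt hge)] at hp
  exact atok_ne_nil q hq (List.prefix_nil.mp hp)

lemma find_of_prefix {l t : List Char} {i : Nat} (h : t <+: l.drop i) :
    PySem.Chars.find l t ≠ -1 ∧ 0 ≤ PySem.Chars.find l t ∧
      (PySem.Chars.find l t).toNat ≤ i ∧ t <+: l.drop (PySem.Chars.find l t).toNat := by
  have hinf : t <:+: l := h.isInfix.trans (List.drop_suffix i l).isInfix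
  have h0 : 0 ≤ PySem.Chars.find l t := (PySem.Chars.find_nonneg_iff l t).mpr hinf
  obtain ⟨hpre, hmin⟩ := PySem.Chars.find_spec h0
  refine ⟨(PySem.Chars.find_ne_neg_one_iff l t).mpr hinf, h0, ?_, hpre⟩
  by_contra hlt
  exact hmin i (Nat.lt_of_not_le hlt) h

lemma rgo_zero (s sub : List Char) :
    PySem.Chars.rfind.go s sub 0 = if sub.isPrefixOf s then (0 : Int) else -1 := by
  simp [PySem.Chars.rfind.go]

lemma rgo_succ (s sub : List Char) (j : Nat) :
    PySem.Chars.rfind.go s sub (j+1) =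
      if sub.isPrefixOf (s.drop (j+1)) then ((j+1 : Nat) : Int) else PySem.Chars.rfind.go s sub j := by
  simp [PySem.Chars.rfind.go]

lemma rgo_spec {s sub : List Char} (j : Nat) (h : PySem.Chars.rfind.go s sub j ≠ -1) :
    0 ≤ PySem.Chars.rfind.go s sub j ∧ sub <+: s.drop (PySem.Chars.rfind.go s sub j).toNat := by
  induction j with
  | zero =>
    by_cases hp : sub.isPrefixOf s
    · rw [rgo_zero, if_pos hp]
      simpa using List.isPrefixOf_iff_prefix.mp hp
    · rw [rgo_zero, if_neg hp] at h
      exact absurd rfl h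
  | succ j ih =>
    by_cases hp : sub.isPrefixOf (s.drop (j+1))
    · rw [rgo_succ, if_pos hp]
      exact ⟨by positivity, by simpa using List.isPrefixOf_iff_prefix.mp hp⟩
    · rw [rgo_succ, if_neg hp] at h ⊢
      exact ih h

lemma rgo_max {s sub : List Char} {i : Nat} (j : Nat) (hi : i ≤ j) (hp : sub <+: s.drop i) :
    PySem.Chars.rfind.go s sub j ≠ -1 ∧ (i : Int) ≤ PySem.Chars.rfind.go s sub j := by
  induction j with
  | zero =>
    have hi0 : i = 0 := Nat.le_zero.mp hi
    subst hi0
    have hp' : sub.isPrefixOf s := List.isPrefixOf_iff_prefix.mpr (by simpa using hp)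
    rw [rgo_zero, if_pos hp']
    norm_num
  | succ j ih =>
    by_cases hpj : sub.isPrefixOf (s.drop (j+1))
    · rw [rgo_succ, if_pos hpj]
      constructor
      · intro hcon
        omega
      · exact_mod_cast hi
    · have hij : i ≤ j := by
        rcases Nat.lt_or_ge i (j+1) with h' | h'
        · omega
        · exfalso
          have hie : i = j + 1 := by omega
          subst hie
          exact hpj (List.isPrefixOf_iff_prefix.mpr hp)
      rw [rgo_succ, if_neg hpj]
      exact ih hij

lemma rfind_of_prefix {l t : List Char} {i : Nat} (ht : t ≠ []) (h : t <+: l.drop i) :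
    PySem.Chars.rfind l t ≠ -1 ∧ (i : Int) ≤ PySem.Chars.rfind l t := by
  have hi : i < l.length := by
    by_contra hge
    rw [List.drop_eq_nil_of_le (Nat.le_of_not_lt hge)] at h
    exact ht (List.prefix_nil.mp h)
  have := rgo_max l.length (Nat.le_of_lt hi) h
  simpa [PySem.Chars.rfind] using this

lemma rfind_spec {l t : List Char} (h : PySem.Chars.rfind l t ≠ -1) :
    0 ≤ PySem.Chars.rfind l t ∧ t <+: l.drop (PySem.Chars.rfind l t).toNat := by
  have := rgo_spec (s := l) (sub := t) l.length (by simpa [PySem.Chars.rfind] using h)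
  simpa [PySem.Chars.rfind] using this
-- ---- generic facts about the conditional-insert fold and update ----
lemma compAux_get (key : (List Char × List Char) → Int) (cands : List (List Char × List Char)) :
    ∀ (init : PySem.Dict Int (List Char)) (k : Int) (v : List Char),
      (cands.foldl (fun d p => if key p ≠ -1 then d.insert (key p) p.2 else d) init).get? k = some v →
      (∃ p ∈ cands, key p ≠ -1 ∧ key p = k ∧ p.2 = v) ∨ init.get? k = some v := by
  induction cands with
  | nil => intro init k v h; exact Or.inr h
  | cons p ps ih =>
    intro init k v h
    simp only [List.foldl_cons] at h
    rcases ih _ k v h with ⟨p', hp', h1, h2, h3⟩ | hbase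
    · exact Or.inl ⟨p', List.mem_cons_of_mem _ hp', h1, h2, h3⟩
    · by_cases hc : key p ≠ -1
      · rw [if_pos hc, PySem.Dict.get?_insert] at hbase
        by_cases hk : k = key p
        · rw [if_pos hk] at hbase
          exact Or.inl ⟨p, List.mem_cons_self, hc, hk.symm, Option.some_inj.mp hbase⟩
        · rw [if_neg hk] at hbase
          exact Or.inr hbase
      · rw [if_neg hc] at hbase
        exact Or.inr hbase

lemma compAux_keys (key : (List Char × List Char) → Int) (cands : List (List Char × List Char)) :
    ∀ (init : PySem.Dict Int (List Char)) (k : Int),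
      k ∈ (cands.foldl (fun d p => if key p ≠ -1 then d.insert (key p) p.2 else d) init).keys ↔
      (∃ p ∈ cands, key p ≠ -1 ∧ key p = k) ∨ k ∈ init.keys := by
  induction cands with
  | nil => intro init k; simp
  | cons p ps ih =>
    intro init k
    simp only [List.foldl_cons]
    rw [ih]
    constructor
    · rintro (⟨p', hp', h1, h2⟩ | hbase)
      · exact Or.inl ⟨p', List.mem_cons_of_mem _ hp', h1, h2⟩
      · by_cases hc : key p ≠ -1
        · rw [if_pos hc, PySem.Dict.mem_keys_insert] at hbase
          rcases hbase with h | h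
          · exact Or.inl ⟨p, List.mem_cons_self, hc, h.symm⟩
          · exact Or.inr h
        · rw [if_neg hc] at hbase
          exact Or.inr hbase
    · rintro (⟨p', hp', h1, h2⟩ | hbase)
      · rcases List.mem_cons.mp hp' with rfl | hmem
        · right
          rw [if_pos h1, PySem.Dict.mem_keys_insert]
          exact Or.inl h2.symm
        · exact Or.inl ⟨p', hmem, h1, h2⟩
      · right
        by_cases hc : key p ≠ -1
        · rw [if_pos hc, PySem.Dict.mem_keys_insert]
          exact Or.inr hbase
        · rw [if_neg hc]
          exact hbase

lemma compAux_nodup (key : (List Char × List Char) → Int) (cands : List (List Char × List Char)) :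
    ∀ (init : PySem.Dict Int (List Char)), init.keys.Nodup →
      (cands.foldl (fun d p => if key p ≠ -1 then d.insert (key p) p.2 else d) init).keys.Nodup := by
  induction cands with
  | nil => intro init h; exact h
  | cons p ps ih =>
    intro init h
    simp only [List.foldl_cons]
    apply ih
    by_cases hc : key p ≠ -1
    · rw [if_pos hc]
      exact PySem.Dict.nodup_keys_insert _ _ _ h
    · rw [if_neg hc]
      exact h

lemma upd_get (ps : List (Int × List Char)) :
    ∀ (init : PySem.Dict Int (List Char)) (k : Int) (v : List Char),
      (init.update ps).get? k = some v →
      (k, v) ∈ ps ∨ init.get? k = some v := by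
  induction ps with
  | nil => intro init k v h; exact Or.inr h
  | cons p ps ih =>
    intro init k v h
    simp only [PySem.Dict.update, List.foldl_cons] at h
    rcases ih _ k v (by simpa [PySem.Dict.update] using h) with hmem | hbase
    · exact Or.inl (List.mem_cons_of_mem _ hmem)
    · rw [PySem.Dict.get?_insert] at hbase
      by_cases hk : k = p.1
      · rw [if_pos hk] at hbase
        left
        have hv2 : p.2 = v := Option.some_inj.mp hbase
        have hkv : (k, v) = p := by rw [hk, ← hv2]
        rw [hkv]
        exact List.mem_cons_self
      · rw [if_neg hk] at hbase
        exact Or.inr hbase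

lemma upd_keys (ps : List (Int × List Char)) :
    ∀ (init : PySem.Dict Int (List Char)) (k : Int),
      k ∈ (init.update ps).keys ↔ (∃ v, (k, v) ∈ ps) ∨ k ∈ init.keys := by
  induction ps with
  | nil => intro init k; simp [PySem.Dict.update]
  | cons p ps ih =>
    intro init k
    simp only [PySem.Dict.update, List.foldl_cons]
    rw [show (List.foldl (fun acc p => acc.insert p.1 p.2) (init.insert p.1 p.2) ps) = ((init.insert p.1 p.2).update ps) from rfl, ih]
    constructor
    · rintro (⟨v, hv⟩ | hbase)
      · exact Or.inl ⟨v, List.mem_cons_of_mem _ hv⟩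
      · rw [PySem.Dict.mem_keys_insert] at hbase
        rcases hbase with h | h
        · exact Or.inl ⟨p.2, by rw [h]; exact List.mem_cons_self⟩
        · exact Or.inr h
    · rintro (⟨v, hv⟩ | hbase)
      · rcases List.mem_cons.mp hv with heq | hmem
        · right
          rw [PySem.Dict.mem_keys_insert]
          exact Or.inl (by rw [← heq])
        · exact Or.inl ⟨v, hmem⟩
      · right
        rw [PySem.Dict.mem_keys_insert]
        exact Or.inr hbase

-- ---- the merged dict ----
lemma compA_get {key : (List Char × List Char) → Int} {k : Int} {v : List Char}
    (h : (compA key).get? k = some v) :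
    ∃ p ∈ MAPPING_A, key p ≠ -1 ∧ key p = k ∧ p.2 = v := by
  unfold compA at h
  rcases compAux_get key MAPPING_A PySem.Dict.empty k v h with h1 | h2
  · exact h1
  · rw [PySem.Dict.get?_empty] at h2
    cases h2

lemma compA_keys {key : (List Char × List Char) → Int} {k : Int} :
    k ∈ (compA key).keys ↔ ∃ p ∈ MAPPING_A, key p ≠ -1 ∧ key p = k := by
  unfold compA
  rw [compAux_keys]
  simp [PySem.Dict.keys_empty]

lemma compA_nodup {key : (List Char × List Char) → Int} : (compA key).keys.Nodup := by
  unfold compA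
  exact compAux_nodup key MAPPING_A PySem.Dict.empty (by rw [PySem.Dict.keys_empty]; exact List.nodup_nil)

lemma comp_items_get {key : (List Char × List Char) → Int} {k : Int} {v : List Char}
    (h : (k, v) ∈ (compA key).items) : (compA key).get? k = some v :=
  PySem.Dict.get?_of_mem_items _ h compA_nodup

lemma comp_keys_items {key : (List Char × List Char) → Int} {k : Int}
    (h : k ∈ (compA key).keys) : ∃ v, (k, v) ∈ (compA key).items := by
  simpa [PySem.Dict.keys] using h

lemma idx_get {l : List Char} {k : Int} {v : List Char}
    (h : (indexesA l).get? k = some v) : isCand l k v := by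
  unfold indexesA at h
  have mk4 : ∀ (key : (List Char × List Char) → Int),
      (k, v) ∈ (compA key).items → ∃ p ∈ MAPPING_A, key p ≠ -1 ∧ key p = k ∧ p.2 = v :=
    fun key hm => compA_get (comp_items_get hm)
  rcases upd_get _ _ k v h with h4 | h
  · obtain ⟨p, hp, h1, h2, h3⟩ := mk4 _ h4
    exact ⟨p, hp, h3.symm, h2 ▸ h1, Or.inr (Or.inr (Or.inr h2.symm))⟩
  rcases upd_get _ _ k v h with h3' | h
  · obtain ⟨p, hp, h1, h2, h3⟩ := mk4 _ h3'
    exact ⟨p, hp, h3.symm, h2 ▸ h1, Or.inr (Or.inr (Or.inl h2.symm))⟩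
  rcases upd_get _ _ k v h with h2' | h
  · obtain ⟨p, hp, h1, h2, h3⟩ := mk4 _ h2'
    exact ⟨p, hp, h3.symm, h2 ▸ h1, Or.inr (Or.inl h2.symm)⟩
  rcases upd_get _ _ k v h with h1' | h
  · obtain ⟨p, hp, h1, h2, h3⟩ := mk4 _ h1'
    exact ⟨p, hp, h3.symm, h2 ▸ h1, Or.inl h2.symm⟩
  · rw [PySem.Dict.get?_empty] at h
    cases h

lemma idx_keys {l : List Char} {k : Int} :
    k ∈ (indexesA l).keys ↔ ∃ v, isCand l k v := by
  have mk4 : ∀ (key : (List Char × List Char) → Int),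
      (∃ v, (k, v) ∈ (compA key).items) →
      ∃ p ∈ MAPPING_A, key p ≠ -1 ∧ key p = k :=
    fun key ⟨v, hv⟩ => by
      obtain ⟨p, hp, h1, h2, h3⟩ := compA_get (comp_items_get hv)
      exact ⟨p, hp, h1, h2⟩
  constructor
  · intro h
    unfold indexesA at h
    rcases (upd_keys _ _ _).mp h with h4 | h
    · obtain ⟨p, hp, h1, h2⟩ := mk4 _ h4
      exact ⟨p.2, p, hp, rfl, h2 ▸ h1, Or.inr (Or.inr (Or.inr h2.symm))⟩
    rcases (upd_keys _ _ _).mp h with h3' | h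
    · obtain ⟨p, hp, h1, h2⟩ := mk4 _ h3'
      exact ⟨p.2, p, hp, rfl, h2 ▸ h1, Or.inr (Or.inr (Or.inl h2.symm))⟩
    rcases (upd_keys _ _ _).mp h with h2' | h
    · obtain ⟨p, hp, h1, h2⟩ := mk4 _ h2'
      exact ⟨p.2, p, hp, rfl, h2 ▸ h1, Or.inr (Or.inl h2.symm)⟩
    rcases (upd_keys _ _ _).mp h with h1' | h
    · obtain ⟨p, hp, h1, h2⟩ := mk4 _ h1'
      exact ⟨p.2, p, hp, rfl, h2 ▸ h1, Or.inl h2.symm⟩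
    · rw [PySem.Dict.keys_empty] at h
      cases h
  · rintro ⟨v, p, hp, hv, hne, hdisj⟩
    unfold indexesA
    rcases hdisj with hk | hk | hk | hk
    · refine (upd_keys _ _ _).mpr (Or.inr ((upd_keys _ _ _).mpr (Or.inr ((upd_keys _ _ _).mpr (Or.inr ((upd_keys _ _ _).mpr (Or.inl ?_)))))))
      exact comp_keys_items (compA_keys.mpr ⟨p, hp, by rw [← hk]; exact hne, hk.symm⟩)
    · refine (upd_keys _ _ _).mpr (Or.inr ((upd_keys _ _ _).mpr (Or.inr ((upd_keys _ _ _).mpr (Or.inl ?_)))))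
      exact comp_keys_items (compA_keys.mpr ⟨p, hp, by rw [← hk]; exact hne, hk.symm⟩)
    · refine (upd_keys _ _ _).mpr (Or.inr ((upd_keys _ _ _).mpr (Or.inl ?_)))
      exact comp_keys_items (compA_keys.mpr ⟨p, hp, by rw [← hk]; exact hne, hk.symm⟩)
    · refine (upd_keys _ _ _).mpr (Or.inl ?_)
      exact comp_keys_items (compA_keys.mpr ⟨p, hp, by rw [← hk]; exact hne, hk.symm⟩)

lemma idx_nodup {l : List Char} : (indexesA l).keys.Nodup := by
  unfold indexesA
  apply PySem.Dict.nodup_keys_update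
  apply PySem.Dict.nodup_keys_update
  apply PySem.Dict.nodup_keys_update
  apply PySem.Dict.nodup_keys_update
  rw [PySem.Dict.keys_empty]
  exact List.nodup_nil

-- ---- semantics of candidates ----
lemma find_spec' {l t : List Char} (h : PySem.Chars.find l t ≠ -1) :
    0 ≤ PySem.Chars.find l t ∧ t <+: l.drop (PySem.Chars.find l t).toNat := by
  have hinf := (PySem.Chars.find_ne_neg_one_iff l t).mp h
  have h0 := (PySem.Chars.find_nonneg_iff l t).mpr hinf
  exact ⟨h0, (PySem.Chars.find_spec h0).1⟩

lemma isCand_M {l : List Char} {k : Int} {v : List Char} (h : isCand l k v) :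
    0 ≤ k ∧ ∃ c, v = [c] ∧ M l k.toNat = some c := by
  obtain ⟨p, hp, hv, hne, hdisj⟩ := h
  obtain ⟨hhead, hw, hd⟩ := mapping_atok p hp
  rcases hdisj with hk | hk | hk | hk <;> subst hk
  · obtain ⟨h0, hpre⟩ := find_spec' hne
    exact ⟨h0, p.2.headI, hv.trans hhead, M_eq_of_prefix hw hpre⟩
  · obtain ⟨h0, hpre⟩ := rfind_spec hne
    exact ⟨h0, p.2.headI, hv.trans hhead, M_eq_of_prefix hw hpre⟩
  · obtain ⟨h0, hpre⟩ := find_spec' hne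
    exact ⟨h0, p.2.headI, hv.trans hhead, M_eq_of_prefix hd (by rw [← hhead]; exact hpre)⟩
  · obtain ⟨h0, hpre⟩ := rfind_spec hne
    exact ⟨h0, p.2.headI, hv.trans hhead, M_eq_of_prefix hd (by rw [← hhead]; exact hpre)⟩
lemma M_keys_le {l : List Char} {i : Nat} {c : Char} (h : M l i = some c) :
    (∃ k, (∃ v, isCand l k v) ∧ k ≤ (i : Int)) ∧
    (∃ k, (∃ v, isCand l k v) ∧ (i : Int) ≤ k) := by
  obtain ⟨q, hq, hqc, hpre⟩ := M_some_spec h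
  obtain ⟨p, hp, hp2, hq1⟩ := atok_mapping q hq
  have hsearch : q.1 = p.1 ∨ q.1 = p.2 := by
    rcases hq1 with h' | h'
    · exact Or.inl h'.symm
    · exact Or.inr h'.symm
  constructor
  · obtain ⟨hne, h0, hle, -⟩ := find_of_prefix hpre
    refine ⟨PySem.Chars.find l q.1, ⟨p.2, p, hp, rfl, ?_, ?_⟩, by omega⟩
    · exact hne
    · rcases hsearch with h' | h'
      · exact Or.inl (by rw [h'])
      · exact Or.inr (Or.inr (Or.inl (by rw [h'])))
  · obtain ⟨hne, hge⟩ := rfind_of_prefix (atok_ne_nil q hq) hpre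
    refine ⟨PySem.Chars.rfind l q.1, ⟨p.2, p, hp, rfl, ?_, ?_⟩, hge⟩
    · exact hne
    · rcases hsearch with h' | h'
      · exact Or.inr (Or.inl (by rw [h']))
      · exact Or.inr (Or.inr (Or.inr (by rw [h'])))

-- ---- B-side characterisation ----
lemma stepB_eq (l : List Char) (acc : List Int) (i : Nat) :
    stepB l acc i = acc ++ stepB l [] i := by
  unfold stepB
  rcases h : l[i]? with _ | c
  · simp
  · by_cases hd : PySem.Chars.isIn [c] DIGITS_B
    · simp [hd]
    · rcases hf : WORDS_B.find? (fun p => PySem.Chars.startswith (l.drop i) p.1) with _ | p <;>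
        simp [hd, hf]

lemma foldB_eq (l : List Char) :
    ∀ (xs : List Nat) (acc : List Int),
      xs.foldl (stepB l) acc = acc ++ xs.flatMap (stepB l []) := by
  intro xs
  induction xs with
  | nil => intro acc; simp
  | cons i xs ih =>
    intro acc
    rw [List.foldl_cons, ih, stepB_eq, List.flatMap_cons, List.append_assoc]

lemma stepB_nil_eq {l : List Char} {i : Nat} (hi : i < l.length) :
    stepB l [] i = match M l i with
                   | some c => [(c.toNat : Int) - 48]
                   | none => [] := by
  have hc : l[i]? = some l[i] := List.getElem?_eq_getElem hi
  have hdrop : l.drop i = l[i] :: l.drop (i+1) := List.drop_eq_getElem_cons hi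
  unfold stepB
  rw [hc]
  by_cases hd : PySem.Chars.isIn [l[i]] DIGITS_B
  · have hcd : l[i] ∈ DIGITS_B :=
      (List.singleton_infix_iff _ _).mp ((PySem.Chars.isIn_iff_infix _ _).mp hd)
    have hpre : [l[i]] <+: l.drop i := by
      rw [hdrop]
      exact ⟨l.drop (i+1), rfl⟩
    rw [M_eq_of_prefix (digit_atok _ hcd) hpre]
    simp [hd]
  · have hnone : (DIGITS_B.map (fun c => ([c], c))).find?
        (fun q => q.1.isPrefixOf (l.drop i)) = none := by
      rw [List.find?_eq_none]
      rintro q hq hpq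
      obtain ⟨d, hd', rfl⟩ := List.mem_map.mp hq
      have hp : [d] <+: l.drop i := List.isPrefixOf_iff_prefix.mp hpq
      obtain ⟨t, ht⟩ := hp
      rw [hdrop] at ht
      have hde : d = l[i] := ((List.cons.injEq _ _ _ _).mp ht).1
      subst hde
      exact hd ((PySem.Chars.isIn_iff_infix _ _).mpr ((List.singleton_infix_iff _ _).mpr hd'))
    have hM : M l i = ((ATOK.take 9).find? (fun q => q.1.isPrefixOf (l.drop i))).map (·.2) := by
      unfold M
      conv_lhs => rw [atok_split]
      rw [List.find?_append, hnone, Option.or_none]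
    have hW : WORDS_B.find? (fun p => PySem.Chars.startswith (l.drop i) p.1) =
        ((ATOK.take 9).find? (fun q => q.1.isPrefixOf (l.drop i))).map
          (fun q => (q.1, (q.2.toNat : Int) - 48)) := by
      rw [words_atok, List.find?_map]
      congr 1
    rw [hM]
    rcases hf : (ATOK.take 9).find? (fun q => q.1.isPrefixOf (l.drop i)) with _ | q <;>
      simp [hd, hW, hf]

lemma flatMap_stepB (l : List Char) :
    ∀ (xs : List Nat), (∀ i ∈ xs, i < l.length) →
      xs.flatMap (stepB l []) = (xs.filter (fun i => (M l i).isSome)).map (vAt l) := by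
  intro xs
  induction xs with
  | nil => intro _; simp
  | cons i xs ih =>
    intro h
    have hi : i < l.length := h i List.mem_cons_self
    have hrest : ∀ j ∈ xs, j < l.length := fun j hj => h j (List.mem_cons_of_mem _ hj)
    rw [List.flatMap_cons, List.filter_cons, ih hrest, stepB_nil_eq hi]
    rcases hM : M l i with _ | c
    · simp
    · simp [vAt, hM]

-- ---- order facts ----
lemma posL_pairwise (l : List Char) : (posL l).Pairwise (· < ·) :=
  List.Pairwise.filter _ List.pairwise_lt_range

lemma posL_mem {l : List Char} {i : Nat} : i ∈ posL l ↔ (M l i).isSome := by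
  constructor
  · intro h
    simpa using (List.mem_filter.mp h).2
  · intro h
    obtain ⟨c, hc⟩ := Option.isSome_iff_exists.mp h
    exact List.mem_filter.mpr ⟨List.mem_range.mpr (M_lt_length hc), by simpa using h⟩

lemma sorted_head_min {xs : List Nat} (hp : xs.Pairwise (· < ·)) (h : xs ≠ []) :
    ∀ i ∈ xs, xs.head h ≤ i := by
  cases xs with
  | nil => cases h rfl
  | cons a t =>
    intro i hi
    rw [List.head_cons]
    rcases List.mem_cons.mp hi with rfl | hm
    · exact le_refl _
    · exact le_of_lt ((List.pairwise_cons.mp hp).1 i hm)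

lemma sorted_getLast_max {xs : List Nat} (hp : xs.Pairwise (· < ·)) (h : xs ≠ []) :
    ∀ i ∈ xs, i ≤ xs.getLast h := by
  induction xs with
  | nil => cases h rfl
  | cons a t ih =>
    intro i hi
    cases t with
    | nil =>
      rcases List.mem_singleton.mp hi with rfl
      simp
    | cons b t' =>
      rw [List.getLast_cons (List.cons_ne_nil b t')]
      rcases List.mem_cons.mp hi with rfl | hm
      · exact le_of_lt ((List.pairwise_cons.mp hp).1 _ (List.getLast_mem _))
      · exact ih (List.pairwise_cons.mp hp).2 (List.cons_ne_nil b t') i hm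

lemma idx_lookup {l : List Char} {k : Int} (h : k ∈ (indexesA l).keys) :
    ∃ v, (indexesA l).get? k = some v := by
  have : ∃ v, (k, v) ∈ (indexesA l).items := by simpa [PySem.Dict.keys] using h
  obtain ⟨v, hv⟩ := this
  exact ⟨v, PySem.Dict.get?_of_mem_items _ hv idx_nodup⟩

-- ===== VERDICT (by name: the statement is the Claim_ definition above) =====
theorem find_calibration_number_for_line_spec : Claim_equal_find_calibration_number_for_line := by
  intro line hdom hpre
  unfold Spec_find_calibration_number_for_line
  unfold Pre_find_calibration_number_for_line at hpre
  set l := line.toList with hl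
  -- some token occurs in the line
  have hex : ∃ j c, M l j = some c := by
    obtain ⟨p, hp, hor⟩ := List.any_eq_true.mp hpre
    obtain ⟨hhead, hw, hd⟩ := mapping_atok p hp
    rcases Bool.or_eq_true_iff.mp hor with h1 | h2
    · obtain ⟨j, hj⟩ := (PySem.Chars.exists_prefix_drop_iff_isIn _ _).mpr h1
      exact ⟨j, _, M_eq_of_prefix hw hj⟩
    · obtain ⟨j, hj⟩ := (PySem.Chars.exists_prefix_drop_iff_isIn _ _).mpr h2
      rw [hhead] at hj
      exact ⟨j, _, M_eq_of_prefix hd hj⟩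
  obtain ⟨j0, c0, hj0⟩ := hex
  have hpos_ne : posL l ≠ [] := List.ne_nil_of_mem (posL_mem.mpr (by rw [hj0]; rfl))
  have hkeys : ∃ k, k ∈ (indexesA l).keys := by
    obtain ⟨⟨kf, hckf, -⟩, -⟩ := M_keys_le hj0
    exact ⟨kf, idx_keys.mpr hckf⟩
  obtain ⟨k0, hk0⟩ := hkeys
  rcases hmn : PySem.List.min? (indexesA l).keys (fun k => k) with _ | mn
  · rw [PySem.List.min?_eq_none_iff] at hmn
    rw [hmn] at hk0
    cases hk0
  rcases hmx : PySem.List.max? (indexesA l).keys (fun k => k) with _ | mx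
  · rw [PySem.List.max?_eq_none_iff] at hmx
    rw [hmx] at hk0
    cases hk0
  have hmn_mem := PySem.List.min?_mem hmn
  have hmn_min := PySem.List.min?_isMin hmn
  have hmx_mem := PySem.List.max?_mem hmx
  have hmx_max := PySem.List.max?_isMax hmx
  obtain ⟨v1, hget1⟩ := idx_lookup hmn_mem
  obtain ⟨v2, hget2⟩ := idx_lookup hmx_mem
  obtain ⟨hmn0, c1, hv1, hM1⟩ := isCand_M (idx_get hget1)
  obtain ⟨hmx0, c2, hv2, hM2⟩ := isCand_M (idx_get hget2)
  have hhead_mem : (posL l).head hpos_ne ∈ posL l := List.head_mem hpos_ne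
  have hlast_mem : (posL l).getLast hpos_ne ∈ posL l := List.getLast_mem hpos_ne
  have hmn_pos : mn.toNat ∈ posL l := posL_mem.mpr (by rw [hM1]; rfl)
  have hmx_pos : mx.toNat ∈ posL l := posL_mem.mpr (by rw [hM2]; rfl)
  have hmn_le_pos : ∀ i ∈ posL l, mn ≤ (i : Int) := by
    intro i hi
    obtain ⟨c', hc'⟩ := Option.isSome_iff_exists.mp (posL_mem.mp hi)
    obtain ⟨⟨kf, hckf, hkle⟩, -⟩ := M_keys_le hc'
    exact le_trans (hmn_min kf (idx_keys.mpr hckf)) hkle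
  have hpos_le_mx : ∀ i ∈ posL l, (i : Int) ≤ mx := by
    intro i hi
    obtain ⟨c', hc'⟩ := Option.isSome_iff_exists.mp (posL_mem.mp hi)
    obtain ⟨-, kr, hckr, hkge⟩ := M_keys_le hc'
    exact le_trans hkge (hmx_max kr (idx_keys.mpr hckr))
  have hhead_eq : (posL l).head hpos_ne = mn.toNat := by
    have h1 := sorted_head_min (posL_pairwise l) hpos_ne mn.toNat hmn_pos
    have h2 := hmn_le_pos _ hhead_mem
    omega
  have hlast_eq : (posL l).getLast hpos_ne = mx.toNat := by
    have h1 := sorted_getLast_max (posL_pairwise l) hpos_ne mx.toNat hmx_pos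
    have h2 := hpos_le_mx _ hlast_mem
    omega
  have hc1d : c1 ∈ DIGITS_B := by
    obtain ⟨q, hq, hqc, -⟩ := M_some_spec hM1
    exact hqc ▸ atok_digit q hq
  have hc2d : c2 ∈ DIGITS_B := by
    obtain ⟨q, hq, hqc, -⟩ := M_some_spec hM2
    exact hqc ▸ atok_digit q hq
  have hA : find_calibration_number_for_line line
      = 10 * ((c1.toNat : Int) - 48) + ((c2.toNat : Int) - 48) := by
    simp only [find_calibration_number_for_line, ← hl, hmn, hmx, hget1, hget2, hv1, hv2]
    rw [List.singleton_append, ofChars_two_digits c1 hc1d c2 hc2d]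
    rfl
  have hB : find_calibration_number_for_line_alt line
      = 10 * vAt l mn.toNat + vAt l mx.toNat := by
    simp only [find_calibration_number_for_line_alt, ← hl]
    rw [foldB_eq, flatMap_stepB l _ (fun i hi => List.mem_range.mp hi)]
    rw [show (List.range l.length).filter (fun i => (M l i).isSome) = posL l from rfl]
    obtain ⟨a, t, hat⟩ := List.exists_cons_of_ne_nil hpos_ne
    have ha : a = mn.toNat := by
      have h1 : (posL l).head? = some a := by rw [hat]; rfl
      have h2 : (posL l).head? = some ((posL l).head hpos_ne) := List.head?_eq_some_head hpos_ne
      exact (Option.some_inj.mp (h1.symm.trans h2)).trans hhead_eq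
    have hb : (a :: t).getLast (List.cons_ne_nil a t) = mx.toNat := by
      have h1 : (posL l).getLast? = some ((a :: t).getLast (List.cons_ne_nil a t)) := by
        rw [hat]
        exact List.getLast?_eq_some_getLast _
      have h2 : (posL l).getLast? = some ((posL l).getLast hpos_ne) := List.getLast?_eq_some_getLast _
      exact ((Option.some_inj.mp (h1.symm.trans h2)).trans hlast_eq)
    rw [hat]
    simp only [List.map_cons, List.nil_append]
    rw [show (vAt l a :: t.map (vAt l)).getLast (List.cons_ne_nil _ _)
          = ((a :: t).map (vAt l)).getLast (by simp) from rfl, List.getLast_map]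
    rw [hb, ha]
  rw [hA, hB]
  simp [vAt, hM1, hM2]
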